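-- pv_equiv track=rewrite | github.com/jzySaber1996/SCPatcher | src/ice_extraction/data_collection.py | code_ranking
-- ===== SOURCE A (Python) =====
-- def code_ranking(text):
--     l_code_text = text.split('[CODE]')
--     if len(l_code_text) <= 1:
--         return text
--     text_code_ret = l_code_text[0]
--     count_code_rank = 1
--     for i_code_text in range(len(l_code_text) - 1):
--         text_code_ret += ('[CODE{}]'.format(count_code_rank) + l_code_text[i_code_text + 1])
--         count_code_rank += 1
--     return text_code_ret
-- ===== SOURCE B (Python) =====
-- def code_ranking(text):
--     out = []
--     count = 1
--     i = 0
--     n = len(text)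
--     while i < n:
--         if text.startswith('[CODE]', i):
--             out.append('[CODE{}]'.format(count))
--             count += 1
--             i += 6
--         else:
--             out.append(text[i])
--             i += 1
--     return ''.join(out)
-- ===== Notes on version B (the rewrite author's own statement) =====
-- stated objective: alternative
-- what changed: Replaces split-on-marker-then-rejoin (an intermediate list of pieces plus an indexed numbering loop) with a single left-to-right scan that copies characters and emits the numbered marker in place whenever the literal '[CODE]' starts at the cursor.
import Mathlib
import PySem

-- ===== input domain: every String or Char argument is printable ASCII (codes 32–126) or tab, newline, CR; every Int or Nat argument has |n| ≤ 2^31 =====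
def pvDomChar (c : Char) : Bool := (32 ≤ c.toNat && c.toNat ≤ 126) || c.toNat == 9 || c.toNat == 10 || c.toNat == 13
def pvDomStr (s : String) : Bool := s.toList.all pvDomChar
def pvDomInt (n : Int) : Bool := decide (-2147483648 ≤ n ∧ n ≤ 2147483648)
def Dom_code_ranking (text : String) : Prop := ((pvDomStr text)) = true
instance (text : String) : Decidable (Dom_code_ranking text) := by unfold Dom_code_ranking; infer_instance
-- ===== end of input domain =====

-- B replaces split-then-rejoin by a single in-place scan numbering each '[CODE]' as it is met; alternative decomposition, same cost.

-- ===== PORT A =====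
-- '[CODE{}]'.format(n), as a character list
def pvMarker (n : Int) : List Char := "[CODE".toList ++ PySem.Int.toChars n ++ "]".toList

def code_ranking (text : String) : String :=
  let l := PySem.Chars.splitOn text.toList "[CODE]".toList
  if l.length ≤ 1 then text
  else
    let r := (PySem.List.pyRange 0 ((l.length : Int) - 1) 1).foldl
      (fun (st : List Char × Int) i =>
        (st.1 ++ pvMarker st.2 ++ PySem.List.pyGetD l (i + 1) [], st.2 + 1))
      (PySem.List.pyGetD l 0 [], 1)
    String.ofList r.1

-- ===== PORT B =====
-- the while-loop of Source B: the cursor position i becomes the remaining suffix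
def crGo (n : Int) (l : List Char) : List Char :=
  match l with
  | [] => []
  | c :: rest =>
      if ("[CODE]".toList).isPrefixOf (c :: rest) then
        pvMarker n ++ crGo (n + 1) ((c :: rest).drop 6)
      else c :: crGo n rest
termination_by l.length
decreasing_by all_goals (simp; try omega)

def code_ranking_alt (text : String) : String := String.ofList (crGo 1 text.toList)

-- ===== PRECONDITION & SPEC =====
def Spec_code_ranking (text : String) (out : String) : Prop := out = code_ranking_alt text
instance (text : String) (out : String) : Decidable (Spec_code_ranking text out) := by unfold Spec_code_ranking; infer_instance

-- ===== CLAIM (what is proved, stated in full; the proofs are below) =====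
def Claim_equal_code_ranking : Prop := ∀ (text : String), Dom_code_ranking text → Spec_code_ranking text (code_ranking text)

-- ===== LEMMAS AND PROOFS =====

-- proof-side mirror of splitOn's scan (no fuel, no accumulators)
def splitRec (l : List Char) : List (List Char) :=
  match l with
  | [] => [[]]
  | c :: rest =>
      if ("[CODE]".toList).isPrefixOf (c :: rest) then
        [] :: splitRec ((c :: rest).drop 6)
      else
        match splitRec rest with
        | [] => [[c]]
        | p :: ps => (c :: p) :: ps
termination_by l.length
decreasing_by all_goals (simp; try omega)

def consHead (x : List Char) : List (List Char) → List (List Char)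
  | [] => [x]
  | p :: ps => (x ++ p) :: ps

-- numbering of the pieces after the first, starting at n
def restN (n : Int) : List (List Char) → List Char
  | [] => []
  | p :: ps => pvMarker n ++ p ++ restN (n + 1) ps

theorem splitRec_ne_nil (l : List Char) : splitRec l ≠ [] := by
  cases l with
  | nil => rw [splitRec]; simp
  | cons c rest =>
    rw [splitRec]
    split
    · simp
    · cases hsp : splitRec rest <;> simp

theorem go_spec (fuel : Nat) (l cur : List Char) (acc : List (List Char))
    (h : l.length < fuel) :
    PySem.Chars.splitOn.go "[CODE]".toList fuel l cur acc
      = acc.reverse ++ consHead cur.reverse (splitRec l) := by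
  induction fuel generalizing l cur acc with
  | zero => omega
  | succ f ih =>
    cases l with
    | nil =>
      rw [PySem.Chars.splitOn.go]
      · rw [splitRec]; simp [consHead]
      · omega
    | cons c rest =>
      rw [PySem.Chars.splitOn.go]
      by_cases hp : ("[CODE]".toList).isPrefixOf (c :: rest)
      · rw [if_pos hp]
        have hlen : 6 ≤ (c :: rest).length := by
          simpa using (List.isPrefixOf_iff_prefix.mp hp).length_le
        have hsl : ("[CODE]".toList).length = 6 := by decide
        rw [hsl, ih (List.drop 6 (c :: rest)) [] (cur.reverse :: acc)
              (by simp at h hlen ⊢; omega)]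
        rw [splitRec, if_pos hp]
        cases hsp : splitRec (List.drop 6 (c :: rest)) with
        | nil => exact absurd hsp (splitRec_ne_nil _)
        | cons p ps => simp [consHead]
      · rw [if_neg hp, ih rest (c :: cur) acc (by simp at h ⊢; omega)]
        rw [splitRec, if_neg hp]
        cases hsp : splitRec rest with
        | nil => exact absurd hsp (splitRec_ne_nil _)
        | cons p ps => simp [consHead]

theorem splitOn_eq_splitRec (s : List Char) :
    PySem.Chars.splitOn s "[CODE]".toList = splitRec s := by
  rw [PySem.Chars.splitOn, go_spec (s.length + 1) s [] [] (by omega)]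
  cases h : splitRec s with
  | nil => exact absurd h (splitRec_ne_nil _)
  | cons p ps => simp [consHead]

theorem splitRec_singleton (l p : List Char) (h : splitRec l = [p]) : p = l := by
  induction l using splitRec.induct generalizing p with
  | case1 =>
    rw [splitRec] at h
    simpa using h.symm
  | case2 c rest hp ih =>
    rw [splitRec, if_pos hp] at h
    have := splitRec_ne_nil ((c :: rest).drop 6)
    simp at h
    exact absurd h.2 this
  | case3 c rest hp hnil ih =>
    exact absurd hnil (splitRec_ne_nil _)
  | case4 c rest hp q qs hsp ih =>
    rw [splitRec, if_neg hp, hsp] at h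
    simp at h
    obtain ⟨h1, h2⟩ := h
    subst h2
    subst h1
    rw [ih q hsp]

theorem crGo_eq (l : List Char) (n : Int) (p : List Char) (ps : List (List Char))
    (h : splitRec l = p :: ps) : crGo n l = p ++ restN n ps := by
  induction l using splitRec.induct generalizing n p ps with
  | case1 =>
    rw [splitRec] at h
    rw [crGo]
    simp at h
    obtain ⟨h1, h2⟩ := h
    subst h1; subst h2
    simp [restN]
  | case2 c rest hp ih =>
    rw [splitRec, if_pos hp] at h
    rw [crGo, if_pos hp]
    cases hsp : splitRec ((c :: rest).drop 6) with
    | nil => exact absurd hsp (splitRec_ne_nil _)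
    | cons q qs =>
      rw [hsp] at h
      simp at h
      obtain ⟨h1, h2⟩ := h
      subst h1; subst h2
      rw [ih (n + 1) q qs hsp]
      simp [restN]
  | case3 c rest hp hnil ih =>
    exact absurd hnil (splitRec_ne_nil _)
  | case4 c rest hp q qs hsp ih =>
    rw [splitRec, if_neg hp, hsp] at h
    simp at h
    obtain ⟨h1, h2⟩ := h
    subst h2
    rw [crGo, if_neg hp, ih n q qs hsp, ← h1]
    simp

theorem loopA (ps : List (List Char)) (l : List (List Char)) (a : Nat) (n : Int)
    (acc : List Char) (hd : l.drop (a + 1) = ps) (ha : a + 1 ≤ l.length) :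
    ((PySem.List.pyRange (a : Int) ((l.length : Int) - 1) 1).foldl
      (fun (st : List Char × Int) i =>
        (st.1 ++ pvMarker st.2 ++ PySem.List.pyGetD l (i + 1) [], st.2 + 1))
      (acc, n)).1 = acc ++ restN n ps := by
  induction ps generalizing a n acc with
  | nil =>
    have hlen : l.length = a + 1 := by
      have := List.drop_eq_nil_iff.mp hd
      omega
    rw [PySem.List.pyRange_one_eq_nil (by omega)]
    simp [restN]
  | cons p ps' ih =>
    have hlt : a + 1 < l.length := by
      by_contra hc
      have : l.drop (a + 1) = [] := List.drop_eq_nil_iff.mpr (by omega)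
      rw [this] at hd; exact absurd hd.symm (by simp)
    rw [PySem.List.pyRange_one_cons (by omega)]
    rw [List.foldl_cons]
    have hget : PySem.List.pyGetD l ((a : Int) + 1) [] = p := by
      rw [show ((a : Int) + 1) = ((a + 1 : Nat) : Int) by push_cast; ring,
          PySem.List.pyGetD_of_nonneg _ _ (by positivity)]
      have : l.getD (((a : Int) + 1).toNat) [] = l[a + 1]'hlt := by
        simp [List.getD_eq_getElem?_getD, List.getElem?_eq_getElem hlt]
      rw [show (((a + 1 : Nat) : Int)).toNat = a + 1 by omega]
      have h0 : (l.drop (a + 1))[0]'(by rw [hd]; simp) = p := by simp [hd]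
      rw [List.getElem_drop] at h0
      simp [List.getD_eq_getElem?_getD, List.getElem?_eq_getElem hlt, h0]
    have hd' : l.drop (a + 1 + 1) = ps' := by
      have : l.drop (a + 1 + 1) = (l.drop (a + 1)).drop 1 := by
        rw [List.drop_drop]
      rw [this, hd]; simp
    have := ih (a + 1) (n + 1) (acc ++ pvMarker n ++ p) hd' (by omega)
    rw [show ((a : Int) + 1) = ((a + 1 : Nat) : Int) by push_cast; ring] at *
    rw [hget, this]
    simp [restN]

theorem code_ranking_eq (text : String) :
    code_ranking text = code_ranking_alt text := by
  unfold code_ranking code_ranking_alt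
  rw [splitOn_eq_splitRec]
  cases hsp : splitRec text.toList with
  | nil => exact absurd hsp (splitRec_ne_nil _)
  | cons p ps =>
    cases ps with
    | nil =>
      have hp : p = text.toList := splitRec_singleton _ _ hsp
      rw [crGo_eq _ 1 p [] hsp]
      simp [restN, hp]
    | cons q qs =>
      simp only [List.length_cons]
      rw [if_neg (by omega)]
      have hget0 : PySem.List.pyGetD (p :: q :: qs) (0 : Int) [] = p := by
        rw [PySem.List.pyGetD_of_nonneg _ _ (by norm_num)]
        simp
      rw [hget0, crGo_eq _ 1 p (q :: qs) hsp]
      have hl := loopA (q :: qs) (p :: q :: qs) 0 1 p (by simp) (by simp)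
      rw [show ((0 : Nat) : Int) = 0 from rfl] at hl
      simp only [List.length_cons] at hl ⊢
      rw [hl]

-- ===== VERDICT (by name: the statement is the Claim_ definition above) =====
theorem code_ranking_spec : Claim_equal_code_ranking := by
  intro text _
  unfold Spec_code_ranking
  exact code_ranking_eq text
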